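-- pv_equiv track=rewrite | github.com/AlexRubino/CS-555-Final-Project | tests/US12_TestParentAge.py | generate_fam_2
-- ===== SOURCE A (Python) =====
-- def generate_fam_2(husband, wife, child, id=1):
--     h_birth, h_death = husband
--     w_birth, w_death = wife
--     c_birth, c_death = child
--     ret =  [
--         f'0 I{id}_1 INDI',
--         '1 BIRT' if h_birth is not None else '',
--         f'2 DATE {h_birth}' if h_birth is not None else '',
--         '1 DEAT' if h_death is not None else '',
--         f'2 DATE {h_death}' if h_death is not None else '',
--         f'1 FAMS F{id}',
--         f'0 I{id}_2 INDI',
--         '1 BIRT' if w_birth is not None else '',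
--         f'2 DATE {w_birth}' if w_birth is not None else '',
--         '1 DEAT' if w_death is not None else '',
--         f'2 DATE {w_death}' if w_death is not None else '',
--         f'1 FAMS F{id}',
--         f'0 F{id} FAM',
--         f'1 HUSB I{id}_1',
--         f'1 WIFE I{id}_2',
--         '1 MARR',
--         f'1 CHIL I{id}_3',
--         f'1 FAMS F{id}',
--         f'0 I{id}_3 INDI',
--         '1 BIRT' if c_birth is not None else '',
--         f'2 DATE {c_birth}' if c_birth is not None else '',
--     ]
--     # This removes all the empty lines
--     return [i for i in ret if i]
-- ===== SOURCE B (Python) =====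
-- def generate_fam_2(husband, wife, child, id=1):
--     h_birth, h_death = husband
--     w_birth, w_death = wife
--     c_birth, c_death = child
--     fam = f'F{id}'
--     # Data-driven: describe the fixture as structured GEDCOM records,
--     # then render them with a generic interpreter.
--     records = [
--         (f'I{id}_1 INDI', [('evt', 'BIRT', h_birth), ('evt', 'DEAT', h_death),
--                            ('kv', 'FAMS', fam)]),
--         (f'I{id}_2 INDI', [('evt', 'BIRT', w_birth), ('evt', 'DEAT', w_death),
--                            ('kv', 'FAMS', fam)]),
--         (f'{fam} FAM', [('kv', 'HUSB', f'I{id}_1'), ('kv', 'WIFE', f'I{id}_2'),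
--                         ('flag', 'MARR', None), ('kv', 'CHIL', f'I{id}_3'),
--                         ('kv', 'FAMS', fam)]),
--         (f'I{id}_3 INDI', [('evt', 'BIRT', c_birth)]),
--     ]
--     lines = []
--     for header, tags in records:
--         lines.append(f'0 {header}')
--         for kind, tag, val in tags:
--             if kind == 'kv':
--                 lines.append(f'1 {tag} {val}')
--             elif kind == 'flag':
--                 lines.append(f'1 {tag}')
--             elif val is not None:
--                 lines.append(f'1 {tag}')
--                 lines.append(f'2 DATE {val}')
--     return lines
-- ===== Notes on version B (the rewrite author's own statement) =====
-- stated objective: alternative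
-- what changed: B models the fixture as a table of structured GEDCOM records (header plus typed entries: optional dated event, tag-value, bare flag) and renders it with a generic interpreter loop, instead of A's hand-written 21-slot line list with '' placeholders removed by a final filter.
import Mathlib
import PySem

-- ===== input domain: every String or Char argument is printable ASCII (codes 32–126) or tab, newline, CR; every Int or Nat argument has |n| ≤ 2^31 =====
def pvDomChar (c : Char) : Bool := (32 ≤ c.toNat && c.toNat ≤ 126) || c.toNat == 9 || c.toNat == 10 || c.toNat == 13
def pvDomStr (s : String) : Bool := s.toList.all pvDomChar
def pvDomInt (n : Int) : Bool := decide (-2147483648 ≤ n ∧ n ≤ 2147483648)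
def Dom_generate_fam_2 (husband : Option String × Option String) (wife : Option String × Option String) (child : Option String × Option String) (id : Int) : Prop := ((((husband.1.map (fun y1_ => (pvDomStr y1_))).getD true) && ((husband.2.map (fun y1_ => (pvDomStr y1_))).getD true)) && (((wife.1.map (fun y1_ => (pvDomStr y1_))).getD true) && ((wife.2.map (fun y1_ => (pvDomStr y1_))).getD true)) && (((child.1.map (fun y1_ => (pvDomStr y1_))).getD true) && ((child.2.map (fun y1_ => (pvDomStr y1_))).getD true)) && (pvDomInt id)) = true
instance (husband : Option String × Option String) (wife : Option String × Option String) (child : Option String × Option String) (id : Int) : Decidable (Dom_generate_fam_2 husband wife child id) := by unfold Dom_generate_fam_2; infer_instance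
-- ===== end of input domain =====

-- B describes the fixture as a table of structured GEDCOM records rendered by a generic interpreter,
-- instead of A's literal 21-slot list with '' placeholders filtered at the end (objective: alternative).

-- ===== PORT A =====
-- literal port: build the 21-slot list with '' placeholders, then filter out empty strings
def generate_fam_2 (husband : Option String × Option String) (wife : Option String × Option String) (child : Option String × Option String) (id : Int) : List String :=
  let i := PySem.Int.toStr id
  let ret : List String := [
    "0 I" ++ i ++ "_1 INDI",
    if husband.1.isSome then "1 BIRT" else "",
    (match husband.1 with | some b => "2 DATE " ++ b | none => ""),
    if husband.2.isSome then "1 DEAT" else "",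
    (match husband.2 with | some d => "2 DATE " ++ d | none => ""),
    "1 FAMS F" ++ i,
    "0 I" ++ i ++ "_2 INDI",
    if wife.1.isSome then "1 BIRT" else "",
    (match wife.1 with | some b => "2 DATE " ++ b | none => ""),
    if wife.2.isSome then "1 DEAT" else "",
    (match wife.2 with | some d => "2 DATE " ++ d | none => ""),
    "1 FAMS F" ++ i,
    "0 F" ++ i ++ " FAM",
    "1 HUSB I" ++ i ++ "_1",
    "1 WIFE I" ++ i ++ "_2",
    "1 MARR",
    "1 CHIL I" ++ i ++ "_3",
    "1 FAMS F" ++ i,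
    "0 I" ++ i ++ "_3 INDI",
    if child.1.isSome then "1 BIRT" else "",
    (match child.1 with | some b => "2 DATE " ++ b | none => "")]
  ret.filter (fun s => s != "")

-- ===== PORT B =====
-- B's record entries: an optional dated event, a tag-with-value line, or a bare flag line
inductive GTag : Type
  | evt : String → Option String → GTag
  | kv : String → String → GTag
  | flag : String → GTag
deriving DecidableEq, Repr

-- generic renderer for one record's entry list (the inner Python loop)
def pvRenderTag (ls : List String) (t : GTag) : List String :=
  match t with
  | GTag.kv tag v => ls ++ ["1 " ++ tag ++ " " ++ v]
  | GTag.flag tag => ls ++ ["1 " ++ tag]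
  | GTag.evt tag (some v) => ls ++ ["1 " ++ tag, "2 DATE " ++ v]
  | GTag.evt _ none => ls

def generate_fam_2_alt (husband : Option String × Option String) (wife : Option String × Option String) (child : Option String × Option String) (id : Int) : List String :=
  let i := PySem.Int.toStr id
  let fam := "F" ++ i
  let records : List (String × List GTag) := [
    ("I" ++ i ++ "_1 INDI", [GTag.evt "BIRT" husband.1, GTag.evt "DEAT" husband.2,
                             GTag.kv "FAMS" fam]),
    ("I" ++ i ++ "_2 INDI", [GTag.evt "BIRT" wife.1, GTag.evt "DEAT" wife.2,
                             GTag.kv "FAMS" fam]),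
    (fam ++ " FAM", [GTag.kv "HUSB" ("I" ++ i ++ "_1"), GTag.kv "WIFE" ("I" ++ i ++ "_2"),
                     GTag.flag "MARR", GTag.kv "CHIL" ("I" ++ i ++ "_3"),
                     GTag.kv "FAMS" fam]),
    ("I" ++ i ++ "_3 INDI", [GTag.evt "BIRT" child.1])]
  records.foldl (fun ls r => r.2.foldl pvRenderTag (ls ++ ["0 " ++ r.1])) []

-- ===== PRECONDITION & SPEC =====
def Spec_generate_fam_2 (husband : Option String × Option String) (wife : Option String × Option String) (child : Option String × Option String) (id : Int) (out : List String) : Prop := out = generate_fam_2_alt husband wife child id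
instance (husband : Option String × Option String) (wife : Option String × Option String) (child : Option String × Option String) (id : Int) (out : List String) : Decidable (Spec_generate_fam_2 husband wife child id out) := by unfold Spec_generate_fam_2; infer_instance

-- ===== CLAIM (what is proved, stated in full; the proofs are below) =====
def Claim_equal_generate_fam_2 : Prop := ∀ (husband : Option String × Option String) (wife : Option String × Option String) (child : Option String × Option String) (id : Int), Dom_generate_fam_2 husband wife child id → Spec_generate_fam_2 husband wife child id (generate_fam_2 husband wife child id)

-- ===== LEMMAS AND PROOFS =====
theorem app_bne_empty (p x : String) (hp : p.toList ≠ []) : ((p ++ x) != "") = true := by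
  simp only [bne_iff_ne, ne_eq]
  intro he
  have : (p ++ x).toList = ("" : String).toList := congrArg String.toList he
  simp only [String.toList_append] at this
  exact hp (List.eq_nil_of_append_eq_nil this).1

-- ===== VERDICT (by name: the statement is the Claim_ definition above) =====
theorem generate_fam_2_spec : Claim_equal_generate_fam_2 := by
  intro husband wife child id _
  unfold Spec_generate_fam_2 generate_fam_2 generate_fam_2_alt
  obtain ⟨h1, h2⟩ := husband
  obtain ⟨w1, w2⟩ := wife
  obtain ⟨c1, c2⟩ := child
  rcases h1 with _ | b1 <;> rcases h2 with _ | d1 <;>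
    rcases w1 with _ | b2 <;> rcases w2 with _ | d2 <;>
    rcases c1 with _ | b3 <;>
    simp [List.filter, List.foldl, pvRenderTag, app_bne_empty] <;>
    and_intros <;> simp [← String.append_assoc]
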